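-- pv_equiv track=rewrite | github.com/5roop/classla_web_anno_pipeline | scripts/process_chunk.py | renumber_conllu_clean
-- ===== SOURCE A (Python) =====
-- def renumber_conllu_clean(conllu_text):
--     paragraphs = []
--     current_paragraph = []
--
--     lines = conllu_text.split("\n")
--
--     for line in lines:
--         if line.startswith("# newpar id = "):
--             # If we have collected sentences for current paragraph, save it
--             if current_paragraph:
--                 paragraphs.append(current_paragraph)
--                 current_paragraph = []
--         current_paragraph.append(line)
--
--     # Don't forget the last paragraph
--     if current_paragraph:
--         paragraphs.append(current_paragraph)
--
--     # Renumber paragraphs and sentences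
--     output_lines = []
--     for par_idx, paragraph in enumerate(paragraphs, 1):
--         sent_count = 0
--
--         for line in paragraph:
--             if line.startswith("# newpar id = "):
--                 # Only add newpar for the first line of first sentence
--                 if sent_count == 0:
--                     output_lines.append(f"# newpar id = {par_idx}")
--             elif line.startswith("# sent_id = "):
--                 sent_count += 1
--                 output_lines.append(f"# sent_id = {par_idx}.{sent_count}")
--             else:
--                 output_lines.append(line)
--
--     return "\n".join(output_lines)
-- ===== SOURCE B (Python) =====
-- def renumber_conllu_clean(conllu_text):
--     output_lines = []
--     par_idx = 1
--     sent_count = 0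
--     for i, line in enumerate(conllu_text.split("\n")):
--         if line.startswith("# newpar id = "):
--             if i > 0:
--                 par_idx += 1
--                 sent_count = 0
--             output_lines.append(f"# newpar id = {par_idx}")
--         elif line.startswith("# sent_id = "):
--             sent_count += 1
--             output_lines.append(f"# sent_id = {par_idx}.{sent_count}")
--         else:
--             output_lines.append(line)
--     return "\n".join(output_lines)
-- ===== Notes on version B (the rewrite author's own statement) =====
-- stated objective: simpler
-- what changed: Replaced the two-phase grouping into a paragraphs list plus enumerate-and-renumber pass with a single linear pass keeping running par_idx/sent_count counters and emitting lines directly.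
import Mathlib
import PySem

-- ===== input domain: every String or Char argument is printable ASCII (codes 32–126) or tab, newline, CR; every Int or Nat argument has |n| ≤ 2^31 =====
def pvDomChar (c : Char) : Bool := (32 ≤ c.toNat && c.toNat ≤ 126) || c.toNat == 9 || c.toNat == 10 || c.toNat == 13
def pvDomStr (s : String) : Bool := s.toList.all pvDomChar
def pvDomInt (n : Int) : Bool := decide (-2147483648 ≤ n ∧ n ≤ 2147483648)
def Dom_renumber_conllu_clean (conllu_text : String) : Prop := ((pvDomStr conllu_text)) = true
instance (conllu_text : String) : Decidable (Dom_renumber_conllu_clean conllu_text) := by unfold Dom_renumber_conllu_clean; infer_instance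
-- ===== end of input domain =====

-- B replaces A's two-phase grouping-then-renumbering with one linear pass over the lines
-- keeping running paragraph/sentence counters (objective: simpler; same return value).

-- ===== PORT A =====
def pvNewparPfx : String := "# newpar id = "
def pvSentPfx : String := "# sent_id = "

-- A, phase 1: group lines into paragraphs (state = (current_paragraph, paragraphs))
def pvAGroupStep (st : List String × List (List String)) (line : String) :
    List String × List (List String) :=
  let st' := if PySem.Str.startswith line pvNewparPfx then
               (if st.1.isEmpty then st else ([], st.2 ++ [st.1]))
             else st
  (st'.1 ++ [line], st'.2)

-- A, phase 2: renumber one paragraph line (state = (sent_count, output so far))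
def pvARenderStep (par_idx : Int) (st : Int × List String) (line : String) : Int × List String :=
  if PySem.Str.startswith line pvNewparPfx then
    (if st.1 == 0 then (st.1, st.2 ++ [pvNewparPfx ++ PySem.Int.toStr par_idx]) else st)
  else if PySem.Str.startswith line pvSentPfx then
    (st.1 + 1, st.2 ++ [pvSentPfx ++ PySem.Int.toStr par_idx ++ "." ++ PySem.Int.toStr (st.1 + 1)])
  else
    (st.1, st.2 ++ [line])

def renumber_conllu_clean (conllu_text : String) : String :=
  let lines := (PySem.Str.split? conllu_text "\n").getD []
  let st := lines.foldl pvAGroupStep ([], [])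
  let paragraphs := if st.1.isEmpty then st.2 else st.2 ++ [st.1]
  let output_lines := (PySem.List.enumerate paragraphs 1).foldl
      (fun out pp => out ++ (pp.2.foldl (pvARenderStep pp.1) (0, [])).2) []
  PySem.Str.join "\n" output_lines

-- ===== PORT B =====
-- one pass; state = (par_idx, sent_count, output_lines), input = (index, line)
def pvBStep (st : Int × Int × List String) (p : Int × String) : Int × Int × List String :=
  if PySem.Str.startswith p.2 pvNewparPfx then
    let pc := if p.1 > 0 then (st.1 + 1, (0 : Int)) else (st.1, st.2.1)
    (pc.1, pc.2, st.2.2 ++ [pvNewparPfx ++ PySem.Int.toStr pc.1])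
  else if PySem.Str.startswith p.2 pvSentPfx then
    (st.1, st.2.1 + 1, st.2.2 ++ [pvSentPfx ++ PySem.Int.toStr st.1 ++ "." ++ PySem.Int.toStr (st.2.1 + 1)])
  else
    (st.1, st.2.1, st.2.2 ++ [p.2])

def renumber_conllu_clean_alt (conllu_text : String) : String :=
  let lines := (PySem.Str.split? conllu_text "\n").getD []
  let st := (PySem.List.enumerate lines 0).foldl pvBStep (1, 0, [])
  PySem.Str.join "\n" st.2.2

-- ===== PRECONDITION & SPEC =====
def Spec_renumber_conllu_clean (conllu_text : String) (out : String) : Prop := out = renumber_conllu_clean_alt conllu_text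
instance (conllu_text : String) (out : String) : Decidable (Spec_renumber_conllu_clean conllu_text out) := by unfold Spec_renumber_conllu_clean; infer_instance

-- ===== CLAIM (what is proved, stated in full; the proofs are below) =====
def Claim_equal_renumber_conllu_clean : Prop := ∀ (conllu_text : String), Dom_renumber_conllu_clean conllu_text → Spec_renumber_conllu_clean conllu_text (renumber_conllu_clean conllu_text)

-- ===== LEMMAS AND PROOFS =====

-- A's grouping, recursively (cur is the nonempty current paragraph)
def pvGroups (cur : List String) : List String → List (List String)
  | [] => [cur]
  | l :: r => if PySem.Str.startswith l pvNewparPfx then cur :: pvGroups [l] r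
              else pvGroups (cur ++ [l]) r

-- the common "rest of the stream" renderer: par/sent are the running counters
def pvGo : List String → Int → Int → List String
  | [], _, _ => []
  | l :: r, par, sent =>
    if PySem.Str.startswith l pvNewparPfx then
      (pvNewparPfx ++ PySem.Int.toStr (par + 1)) :: pvGo r (par + 1) 0
    else if PySem.Str.startswith l pvSentPfx then
      (pvSentPfx ++ PySem.Int.toStr par ++ "." ++ PySem.Int.toStr (sent + 1)) :: pvGo r par (sent + 1)
    else l :: pvGo r par sent

-- A's phase 2, recursively over the list of paragraphs
def pvRender2 : Int → List (List String) → List String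
  | _, [] => []
  | p, g :: gs => (g.foldl (pvARenderStep p) (0, [])).2 ++ pvRender2 (p + 1) gs

theorem pvGroupFold (xs : List String) : ∀ (cur : List String) (pars : List (List String)),
    cur ≠ [] →
    (let st := xs.foldl pvAGroupStep (cur, pars);
     if st.1.isEmpty then st.2 else st.2 ++ [st.1]) = pars ++ pvGroups cur xs := by
  induction xs with
  | nil =>
    intro cur pars hcur
    simp [pvGroups, List.isEmpty_iff, hcur]
  | cons l r ih =>
    intro cur pars hcur
    by_cases h : PySem.Chars.startswith l.toList pvNewparPfx.toList = true
    · have : List.foldl pvAGroupStep (cur, pars) (l :: r)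
          = List.foldl pvAGroupStep ([l], pars ++ [cur]) r := by
        simp [List.foldl_cons, pvAGroupStep, h, List.isEmpty_iff, hcur]
      rw [show (l :: r).foldl pvAGroupStep (cur, pars)
            = List.foldl pvAGroupStep (cur, pars) (l :: r) from rfl, this]
      rw [ih [l] (pars ++ [cur]) (by simp)]
      simp [pvGroups, h]
    · have : List.foldl pvAGroupStep (cur, pars) (l :: r)
          = List.foldl pvAGroupStep (cur ++ [l], pars) r := by
        simp [List.foldl_cons, pvAGroupStep, h]
      rw [show (l :: r).foldl pvAGroupStep (cur, pars)
            = List.foldl pvAGroupStep (cur, pars) (l :: r) from rfl, this]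
      rw [ih (cur ++ [l]) pars (by simp)]
      simp [pvGroups, h]

theorem pvEnumRenderFold (gs : List (List String)) : ∀ (p : Int) (out : List String),
    (PySem.List.enumerate gs p).foldl
        (fun out pp => out ++ (pp.2.foldl (pvARenderStep pp.1) (0, [])).2) out
      = out ++ pvRender2 p gs := by
  induction gs with
  | nil => intro p out; simp [PySem.List.enumerate_nil, pvRender2]
  | cons g gs ih =>
    intro p out
    rw [PySem.List.enumerate_cons, List.foldl_cons, ih]
    simp [pvRender2]

theorem pvMain (xs : List String) : ∀ (cur : List String) (p sc : Int) (out : List String),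
    cur.foldl (pvARenderStep p) (0, []) = (sc, out) →
    pvRender2 p (pvGroups cur xs) = out ++ pvGo xs p sc := by
  induction xs with
  | nil =>
    intro cur p sc out h
    simp [pvGroups, pvRender2, pvGo, h]
  | cons l r ih =>
    intro cur p sc out h
    by_cases h1 : PySem.Chars.startswith l.toList pvNewparPfx.toList = true
    · have hstep : List.foldl (pvARenderStep (p + 1)) (0, ([] : List String)) [l]
          = (0, [pvNewparPfx ++ PySem.Int.toStr (p + 1)]) := by
        simp [pvARenderStep, h1]
      have := ih [l] (p + 1) 0 [pvNewparPfx ++ PySem.Int.toStr (p + 1)] hstep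
      simp [pvGroups, pvGo, pvRender2, h1, this, h]
    · by_cases h2 : PySem.Chars.startswith l.toList pvSentPfx.toList = true
      · have hstep : List.foldl (pvARenderStep p) (0, ([] : List String)) (cur ++ [l])
            = (sc + 1, out ++ [pvSentPfx ++ PySem.Int.toStr p ++ "." ++ PySem.Int.toStr (sc + 1)]) := by
          rw [List.foldl_append, h]
          simp [pvARenderStep, h1, h2]
        have := ih (cur ++ [l]) p (sc + 1) _ hstep
        simp [pvGroups, pvGo, h1, h2, this]
      · have hstep : List.foldl (pvARenderStep p) (0, ([] : List String)) (cur ++ [l])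
            = (sc, out ++ [l]) := by
          rw [List.foldl_append, h]
          simp [pvARenderStep, h1, h2]
        have := ih (cur ++ [l]) p sc _ hstep
        simp [pvGroups, pvGo, h1, h2, this]

theorem pvBFold (xs : List String) : ∀ (k par sent : Int) (out : List String), 1 ≤ k →
    ((PySem.List.enumerate xs k).foldl pvBStep (par, sent, out)).2.2
      = out ++ pvGo xs par sent := by
  induction xs with
  | nil => intro k par sent out _; simp [PySem.List.enumerate_nil, pvGo]
  | cons l r ih =>
    intro k par sent out hk
    rw [PySem.List.enumerate_cons, List.foldl_cons]
    by_cases h1 : PySem.Chars.startswith l.toList pvNewparPfx.toList = true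
    · have hk' : (k : Int) > 0 := by omega
      have hb : pvBStep (par, sent, out) (k, l)
          = (par + 1, 0, out ++ [pvNewparPfx ++ PySem.Int.toStr (par + 1)]) := by
        simp [pvBStep, h1, hk']
      rw [hb, ih (k + 1) (par + 1) 0 _ (by omega)]
      simp [pvGo, h1]
    · by_cases h2 : PySem.Chars.startswith l.toList pvSentPfx.toList = true
      · have hb : pvBStep (par, sent, out) (k, l)
            = (par, sent + 1, out ++ [pvSentPfx ++ PySem.Int.toStr par ++ "." ++ PySem.Int.toStr (sent + 1)]) := by
          simp [pvBStep, h1, h2]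
        rw [hb, ih (k + 1) par (sent + 1) _ (by omega)]
        simp [pvGo, h1, h2]
      · have hb : pvBStep (par, sent, out) (k, l) = (par, sent, out ++ [l]) := by
          simp [pvBStep, h1, h2]
        rw [hb, ih (k + 1) par sent _ (by omega)]
        simp [pvGo, h1, h2]

-- ===== VERDICT (by name: the statement is the Claim_ definition above) =====
theorem renumber_conllu_clean_spec : Claim_equal_renumber_conllu_clean := by
  intro conllu_text _
  unfold Spec_renumber_conllu_clean renumber_conllu_clean renumber_conllu_clean_alt
  cases hx : (PySem.Str.split? conllu_text "\n").getD [] with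
  | nil => simp [PySem.List.enumerate_nil]
  | cons l0 rest =>
    have hfirst : pvAGroupStep ([], []) l0 = ([l0], []) := by
      by_cases h : PySem.Chars.startswith l0.toList pvNewparPfx.toList = true <;> simp [pvAGroupStep, h]
    have hgrp := pvGroupFold rest [l0] [] (by simp)
    have hEnum : PySem.List.enumerate (l0 :: rest) 0 = (0, l0) :: PySem.List.enumerate rest 1 := by
      rw [PySem.List.enumerate_cons]; norm_num
    by_cases h1 : PySem.Chars.startswith l0.toList pvNewparPfx.toList = true
    · have hcur : List.foldl (pvARenderStep 1) (0, ([] : List String)) [l0]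
          = (0, [pvNewparPfx ++ PySem.Int.toStr 1]) := by simp [pvARenderStep, h1]
      have hBstep : pvBStep (1, 0, []) ((0 : Int), l0)
          = (1, 0, [pvNewparPfx ++ PySem.Int.toStr 1]) := by simp [pvBStep, h1]
      dsimp only
      rw [List.foldl_cons, hfirst, hgrp, pvEnumRenderFold]
      simp only [List.nil_append]
      rw [pvMain rest [l0] 1 0 _ hcur, hEnum, List.foldl_cons, hBstep,
        pvBFold rest 1 1 0 _ (by omega)]
    · by_cases h2 : PySem.Chars.startswith l0.toList pvSentPfx.toList = true
      · have hcur : List.foldl (pvARenderStep 1) (0, ([] : List String)) [l0]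
            = (1, [pvSentPfx ++ PySem.Int.toStr 1 ++ "." ++ PySem.Int.toStr 1]) := by
          simp [pvARenderStep, h1, h2]
        have hBstep : pvBStep (1, 0, []) ((0 : Int), l0)
            = (1, 1, [pvSentPfx ++ PySem.Int.toStr 1 ++ "." ++ PySem.Int.toStr 1]) := by
          simp [pvBStep, h1, h2]
        dsimp only
        rw [List.foldl_cons, hfirst, hgrp, pvEnumRenderFold]
        simp only [List.nil_append]
        rw [pvMain rest [l0] 1 1 _ hcur, hEnum, List.foldl_cons, hBstep,
          pvBFold rest 1 1 1 _ (by omega)]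
      · have hcur : List.foldl (pvARenderStep 1) (0, ([] : List String)) [l0]
            = (0, [l0]) := by simp [pvARenderStep, h1, h2]
        have hBstep : pvBStep (1, 0, []) ((0 : Int), l0) = (1, 0, [l0]) := by
          simp [pvBStep, h1, h2]
        dsimp only
        rw [List.foldl_cons, hfirst, hgrp, pvEnumRenderFold]
        simp only [List.nil_append]
        rw [pvMain rest [l0] 1 0 _ hcur, hEnum, List.foldl_cons, hBstep,
          pvBFold rest 1 1 0 _ (by omega)]
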